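-- pv_equiv track=rewrite | github.com/Pofilo/grammalecte | gc_lang/fr/dictionnaire/genfrdic.py | _generateAddCode
-- ===== SOURCE A (Python) =====
-- def _generateAddCode (sWord, sCrippled):
--     "returns addCode to generate sWord from sCrippled"
--     sAdd = ""
--     for i in range(len(sWord)):
--         if sWord[i] != sCrippled[i:i+1]:
--             sCrippled = sCrippled[:i] + sWord[i] + sCrippled[i:]
--             if sAdd:
--                 sAdd += "\t"
--             sAdd += str(i)+"+"+sWord[i]
--     return sAdd  if sAdd  else "0"
-- ===== SOURCE B (Python) =====
-- def _generateAddCode(sWord, sCrippled):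
--     "returns addCode to generate sWord from sCrippled"
--     lToken = []
--     j = 0
--     n = len(sCrippled)
--     for i, c in enumerate(sWord):
--         if j < n and sCrippled[j] == c:
--             j += 1
--         else:
--             lToken.append(str(i) + "+" + c)
--     return "\t".join(lToken) if lToken else "0"
-- ===== Notes on version B (the rewrite author's own statement) =====
-- stated objective: faster
-- what changed: Replaced the loop that rebuilds sCrippled by string slicing on every mismatch with a single two-pointer pass over the original strings that appends tokens to a list and joins them once.
import Mathlib
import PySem

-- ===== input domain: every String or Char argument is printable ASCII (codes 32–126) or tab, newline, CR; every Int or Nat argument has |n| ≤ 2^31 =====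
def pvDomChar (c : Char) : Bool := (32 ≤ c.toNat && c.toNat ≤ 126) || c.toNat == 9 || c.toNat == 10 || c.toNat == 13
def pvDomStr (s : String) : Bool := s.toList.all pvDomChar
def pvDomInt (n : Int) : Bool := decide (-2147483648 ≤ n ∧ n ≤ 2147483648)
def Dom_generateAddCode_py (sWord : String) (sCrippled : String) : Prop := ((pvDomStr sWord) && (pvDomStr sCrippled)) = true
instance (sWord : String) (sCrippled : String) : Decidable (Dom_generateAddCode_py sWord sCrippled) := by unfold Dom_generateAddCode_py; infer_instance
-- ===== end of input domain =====

-- B replaces A's repeated slice-and-rebuild of sCrippled with one two-pointer pass collecting tokens (objective: faster).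


-- ===== PORT A =====
-- one iteration of A's for-loop: state = (current sCrippled, sAdd), loop variable i;
-- sWord[i] is read with pyGetD (the default is never used: i < len(sWord) on every iteration, so Python never raises)
def pvStepA (w : List Char) (st : List Char × List Char) (i : Int) : List Char × List Char :=
  let c := PySem.List.pyGetD w i ' '
  if PySem.List.slice st.1 (some i) (some (i + 1)) ≠ [c] then
    (PySem.List.slice st.1 none (some i) ++ [c] ++ PySem.List.slice st.1 (some i) none,
     (if st.2 ≠ [] then st.2 ++ ['\t'] else st.2) ++ (PySem.Int.toStr i).toList ++ ['+', c])
  else st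

def generateAddCode_py (sWord : String) (sCrippled : String) : String :=
  let w := sWord.toList
  let st := (PySem.List.pyRange 0 (w.length : Int) 1).foldl (pvStepA w) (sCrippled.toList, [])
  if st.2 ≠ [] then String.ofList st.2 else "0"

-- ===== PORT B =====
-- one iteration of B's for-loop: state = (j, lToken), loop variable (i, c);
-- 'j < n and sCrippled[j] == c' is ported as the single test cr[j]? = some c (in range AND equal)
def pvStepB (cr : List Char) (st : Nat × List (List Char)) (p : Int × Char) : Nat × List (List Char) :=
  if cr[st.1]? = some p.2 then (st.1 + 1, st.2)
  else (st.1, st.2 ++ [(PySem.Int.toStr p.1).toList ++ ['+', p.2]])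

def generateAddCode_py_alt (sWord : String) (sCrippled : String) : String :=
  let cr := sCrippled.toList
  let st := (PySem.List.enumerate sWord.toList 0).foldl (pvStepB cr) (0, [])
  if st.2 = [] then "0" else String.ofList (PySem.Chars.join ['\t'] st.2)

-- ===== PRECONDITION & SPEC =====
def Spec_generateAddCode_py (sWord : String) (sCrippled : String) (out : String) : Prop := out = generateAddCode_py_alt sWord sCrippled
instance (sWord : String) (sCrippled : String) (out : String) : Decidable (Spec_generateAddCode_py sWord sCrippled out) := by unfold Spec_generateAddCode_py; infer_instance

-- ===== CLAIM (what is proved, stated in full; the proofs are below) =====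
def Claim_equal_generateAddCode_py : Prop := ∀ (sWord : String) (sCrippled : String), Dom_generateAddCode_py sWord sCrippled → Spec_generateAddCode_py sWord sCrippled (generateAddCode_py sWord sCrippled)

-- ===== LEMMAS AND PROOFS =====

-- the token "i+c"
def pvTok (i : Int) (c : Char) : List Char := (PySem.Int.toStr i).toList ++ ['+', c]

-- the token list both loops produce: walk sWord, consume one crippled char on each match
def pvSpec : List Char → List Char → Int → List (List Char)
  | [], _, _ => []
  | c :: ws, [], i => pvTok i c :: pvSpec ws [] (i + 1)
  | c :: ws, c' :: rs, i =>
    if c' = c then pvSpec ws rs (i + 1) else pvTok i c :: pvSpec ws (c' :: rs) (i + 1)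

lemma pvTok_ne_nil (i : Int) (c : Char) : pvTok i c ≠ [] := by
  simp [pvTok]

lemma pvSpec_ne_nil : ∀ (ws rest : List Char) (i : Int), ∀ t ∈ pvSpec ws rest i, t ≠ [] := by
  intro ws
  induction ws with
  | nil => intro rest i t ht; simp [pvSpec] at ht
  | cons c ws ih =>
    intro rest i t ht
    cases rest with
    | nil =>
      simp only [pvSpec, List.mem_cons] at ht
      rcases ht with h | h
      · exact h ▸ pvTok_ne_nil _ _
      · exact ih [] (i + 1) t h
    | cons c' rs =>
      simp only [pvSpec] at ht
      by_cases hc : c' = c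
      · simp only [if_pos hc] at ht; exact ih rs (i + 1) t ht
      · simp only [if_neg hc, List.mem_cons] at ht
        rcases ht with h | h
        · exact h ▸ pvTok_ne_nil _ _
        · exact ih (c' :: rs) (i + 1) t h

-- join is [] only on the empty token list (tokens being nonempty)
lemma pvJoin_ne_nil : ∀ (ts : List (List Char)), (∀ t ∈ ts, t ≠ []) → ts ≠ [] →
    PySem.Chars.join ['\t'] ts ≠ [] := by
  intro ts
  induction ts with
  | nil => intro _ h; exact absurd rfl h
  | cons t ts _ =>
    intro hne _
    cases ts with
    | nil =>
      rw [PySem.Chars.join_singleton]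
      exact hne t (by simp)
    | cons u us =>
      rw [PySem.Chars.join_cons_cons]
      have : t ≠ [] := hne t (by simp)
      simp [this]

lemma pvJoin_append_singleton : ∀ (ts : List (List Char)) (t : List Char),
    PySem.Chars.join ['\t'] (ts ++ [t]) =
      (if ts = [] then ([] : List Char) else PySem.Chars.join ['\t'] ts ++ ['\t']) ++ t := by
  intro ts
  induction ts with
  | nil => intro t; simp [PySem.Chars.join_singleton]
  | cons u us ih =>
    intro t
    cases us with
    | nil =>
      rw [show (([u] : List (List Char)) ++ [t]) = [u, t] from rfl, PySem.Chars.join_cons_cons,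
        PySem.Chars.join_singleton, PySem.Chars.join_singleton]
      simp
    | cons v vs =>
      have h2 : ((v :: vs : List (List Char)) ++ [t]) = v :: (vs ++ [t]) := rfl
      rw [show ((u :: v :: vs : List (List Char)) ++ [t]) = u :: v :: (vs ++ [t]) from rfl,
        PySem.Chars.join_cons_cons, ← h2, ih, PySem.Chars.join_cons_cons]
      simp

-- A's sAdd update, expressed on the token list
lemma pvSAdd_step (ts : List (List Char)) (t : List Char)
    (hne : ∀ u ∈ ts, u ≠ []) :
    (if PySem.Chars.join ['\t'] ts ≠ [] then PySem.Chars.join ['\t'] ts ++ ['\t']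
     else PySem.Chars.join ['\t'] ts) ++ t = PySem.Chars.join ['\t'] (ts ++ [t]) := by
  rw [pvJoin_append_singleton]
  by_cases h : ts = []
  · subst h
    simp [show PySem.Chars.join ['\t'] [] = [] from rfl]
  · have := pvJoin_ne_nil ts hne h
    simp [h, this]

-- B's loop computes pvSpec
lemma pvB_loop (cr : List Char) : ∀ (ws : List Char) (j : Nat) (ts : List (List Char)) (i : Int),
    ((PySem.List.enumerate ws i).foldl (pvStepB cr) (j, ts)).2 = ts ++ pvSpec ws (cr.drop j) i := by
  intro ws
  induction ws with
  | nil => intro j ts i; simp [PySem.List.enumerate_nil, pvSpec]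
  | cons c ws ih =>
    intro j ts i
    rw [PySem.List.enumerate_cons, List.foldl_cons]
    rcases h : cr[j]? with _ | c'
    · -- j past the end of sCrippled
      have hdrop : cr.drop j = [] := by
        rw [List.drop_eq_nil_iff]
        exact List.getElem?_eq_none_iff.mp h
      rw [show pvStepB cr (j, ts) (i, c) = (j, ts ++ [pvTok i c]) by
            simp [pvStepB, h, pvTok]]
      rw [ih j (ts ++ [pvTok i c]) (i + 1), hdrop]
      simp [pvSpec]
    · obtain ⟨hj, hc⟩ := List.getElem?_eq_some_iff.mp h
      have hdrop : cr.drop j = c' :: cr.drop (j + 1) := by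
        rw [List.drop_eq_getElem_cons hj, hc]
      by_cases hcc : c' = c
      · rw [show pvStepB cr (j, ts) (i, c) = (j + 1, ts) by simp [pvStepB, h, hcc]]
        rw [ih (j + 1) ts (i + 1), hdrop]
        simp [pvSpec, hcc]
      · rw [show pvStepB cr (j, ts) (i, c) = (j, ts ++ [pvTok i c]) by
              simp [pvStepB, h, pvTok, hcc]]
        rw [ih j (ts ++ [pvTok i c]) (i + 1), hdrop]
        simp [pvSpec, hcc]

-- facts about A's step at index s on the invariant state (w.take s ++ rest)
lemma pvDrop_take_append (w rest : List Char) (s : Nat) (h : s ≤ w.length) :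
    (w.take s ++ rest).drop s = rest := by
  rw [List.drop_append_of_le_length (by simp [h])]; simp

lemma pvTake_take_append (w rest : List Char) (s : Nat) (h : s ≤ w.length) :
    (w.take s ++ rest).take s = w.take s := by
  rw [List.take_append_of_le_length (by simp [h])]; simp

lemma pvTake_add_one (w : List Char) (s : Nat) (h : s < w.length) :
    w.take (s + 1) = w.take s ++ [w[s]] := by
  rw [List.take_add_one]; simp [List.getElem?_eq_getElem h]

lemma pvSlice1 (cr : List Char) (s : Nat) :
    PySem.List.slice cr (some (s : Int)) (some ((s : Int) + 1)) = (cr.drop s).take 1 := by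
  have := PySem.List.slice_natCast_add cr s 1
  simpa using this

lemma pvGetD (w : List Char) (s : Nat) (h : s < w.length) (d : Char) :
    PySem.List.pyGetD w (s : Int) d = w[s] := by
  simp [PySem.List.pyGetD_natCast, List.getD_eq_getElem?_getD, List.getElem?_eq_getElem h]

-- A's loop computes pvSpec (joined), with the invariant: sCrippled = sWord[:i] + rest
lemma pvA_loop (w : List Char) : ∀ (k s : Nat) (rest : List Char) (ts : List (List Char)),
    s + k = w.length → (∀ t ∈ ts, t ≠ []) →
    ∃ rest', (PySem.List.pyRange (s : Int) (w.length : Int) 1).foldl (pvStepA w)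
        (w.take s ++ rest, PySem.Chars.join ['\t'] ts)
      = (w ++ rest', PySem.Chars.join ['\t'] (ts ++ pvSpec (w.drop s) rest (s : Int))) := by
  intro k
  induction k with
  | zero =>
    intro s rest ts hs _
    have hs' : s = w.length := by omega
    subst hs'
    refine ⟨rest, ?_⟩
    rw [show PySem.List.pyRange (w.length : Int) (w.length : Int) 1 = [] by
          simp [PySem.List.pyRange]]
    simp [pvSpec]
  | succ k ih =>
    intro s rest ts hs hne
    have hlt : s < w.length := by omega
    have hle : s ≤ w.length := by omega
    have hcast : ((s : Int) + 1) = ((s + 1 : Nat) : Int) := by push_cast; ring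
    rw [PySem.List.pyRange_one_cons (by exact_mod_cast hlt), List.foldl_cons]
    have hdropw : w.drop s = w[s] :: w.drop (s + 1) := List.drop_eq_getElem_cons hlt
    cases rest with
    | nil =>
      have hstep : pvStepA w (w.take s ++ [], PySem.Chars.join ['\t'] ts) (s : Int)
          = (w.take (s + 1) ++ [], PySem.Chars.join ['\t'] (ts ++ [pvTok (s : Int) w[s]])) := by
        simp only [pvStepA, pvGetD w s hlt, pvSlice1, PySem.List.slice_to_natCast,
          PySem.List.slice_from_natCast, pvDrop_take_append w [] s hle,
          pvTake_take_append w [] s hle]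
        rw [if_pos (by simp)]
        simp only [Prod.mk.injEq]
        refine ⟨by rw [pvTake_add_one w s hlt, List.append_assoc], ?_⟩
        rw [List.append_assoc]
        exact pvSAdd_step ts (pvTok (s : Int) w[s]) hne
      rw [hstep, hcast]
      obtain ⟨rest', hrec⟩ := ih (s + 1) [] (ts ++ [pvTok (s : Int) w[s]]) (by omega)
        (by intro u hu
            rcases List.mem_append.mp hu with h | h
            · exact hne u h
            · simp at h; exact h ▸ pvTok_ne_nil _ _)
      refine ⟨rest', ?_⟩
      rw [hrec, hdropw]
      simp only [pvSpec, List.append_assoc, List.singleton_append, hcast]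
    | cons c' rs =>
      by_cases hcc : c' = w[s]
      · -- match: A's test is false, state unchanged; re-read the state with s+1
        have hstep : pvStepA w (w.take s ++ c' :: rs, PySem.Chars.join ['\t'] ts) (s : Int)
            = (w.take (s + 1) ++ rs, PySem.Chars.join ['\t'] ts) := by
          simp only [pvStepA, pvGetD w s hlt, pvSlice1, pvDrop_take_append w (c' :: rs) s hle]
          rw [if_neg (by simp [hcc])]
          rw [pvTake_add_one w s hlt, ← hcc]
          simp
        rw [hstep, hcast]
        obtain ⟨rest', hrec⟩ := ih (s + 1) rs ts (by omega) hne
        refine ⟨rest', ?_⟩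
        rw [hrec, hdropw]
        simp only [pvSpec, if_pos hcc, hcast]
      · -- mismatch: insert w[s] and emit a token
        have hstep : pvStepA w (w.take s ++ c' :: rs, PySem.Chars.join ['\t'] ts) (s : Int)
            = (w.take (s + 1) ++ c' :: rs,
               PySem.Chars.join ['\t'] (ts ++ [pvTok (s : Int) w[s]])) := by
          simp only [pvStepA, pvGetD w s hlt, pvSlice1, PySem.List.slice_to_natCast,
            PySem.List.slice_from_natCast, pvDrop_take_append w (c' :: rs) s hle,
            pvTake_take_append w (c' :: rs) s hle]
          rw [if_pos (by simp [hcc])]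
          simp only [Prod.mk.injEq]
          refine ⟨by rw [pvTake_add_one w s hlt, List.append_assoc], ?_⟩
          rw [List.append_assoc]
          exact pvSAdd_step ts (pvTok (s : Int) w[s]) hne
        rw [hstep, hcast]
        obtain ⟨rest', hrec⟩ := ih (s + 1) (c' :: rs) (ts ++ [pvTok (s : Int) w[s]]) (by omega)
          (by intro u hu
              rcases List.mem_append.mp hu with h | h
              · exact hne u h
              · simp at h; exact h ▸ pvTok_ne_nil _ _)
        refine ⟨rest', ?_⟩
        rw [hrec, hdropw]
        simp only [pvSpec, if_neg hcc, List.append_assoc, List.singleton_append, hcast]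

theorem pv_main (sWord sCrippled : String) :
    generateAddCode_py sWord sCrippled = generateAddCode_py_alt sWord sCrippled := by
  dsimp only [generateAddCode_py, generateAddCode_py_alt]
  obtain ⟨rest', hA⟩ := pvA_loop sWord.toList sWord.toList.length 0 sCrippled.toList [] (by omega)
    (by intro t ht; simp at ht)
  have hA' : (PySem.List.pyRange 0 (sWord.toList.length : Int) 1).foldl (pvStepA sWord.toList)
      (sCrippled.toList, []) = (sWord.toList ++ rest',
        PySem.Chars.join ['\t'] (pvSpec sWord.toList sCrippled.toList 0)) := by
    simpa using hA
  have hB := pvB_loop sCrippled.toList sWord.toList 0 [] 0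
  simp only [List.drop_zero, List.nil_append] at hB
  rw [hA', hB]
  by_cases hS : pvSpec sWord.toList sCrippled.toList 0 = []
  · simp [hS, show PySem.Chars.join ['\t'] [] = [] from rfl]
  · have hj : PySem.Chars.join ['\t'] (pvSpec sWord.toList sCrippled.toList 0) ≠ [] :=
      pvJoin_ne_nil _ (pvSpec_ne_nil _ _ _) hS
    simp [hS, hj]

-- ===== VERDICT (by name: the statement is the Claim_ definition above) =====
theorem generateAddCode_py_spec : Claim_equal_generateAddCode_py := by
  intro sWord sCrippled _
  unfold Spec_generateAddCode_py
  exact pv_main sWord sCrippled
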